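-- pv_equiv track=rewrite | github.com/jshepp27/counta_bot_e2e | counta_bot/detection/stance_classifier.py | overlap_score
-- ===== SOURCE A (Python) =====
-- def overlap_score(evidence_kp, adu_kp):
--     score = 0
--
--     # Split Keyphrase into components, scoring partial units as overlap
--     for i in evidence_kp:
--         for j in i.split():
--             # Ensure string value, to enact .find
--             if " ".join(adu_kp).find(j) != -1:
--                 score += 1
--                 token = j
--
--             else:
--                 continue
--
--     return score
-- ===== SOURCE B (Python) =====
-- def overlap_score(evidence_kp, adu_kp):
--     joined = " ".join(adu_kp)
--     tokens = [t for phrase in evidence_kp for t in phrase.split()]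
--     # substring index: every substring of `joined` whose length is a token length
--     subs = set()
--     for L in set(len(t) for t in tokens):
--         for i in range(len(joined) - L + 1):
--             subs.add(joined[i:i + L])
--     return sum(1 for t in tokens if t in subs)
-- ===== Notes on version B (the rewrite author's own statement) =====
-- stated objective: faster
-- what changed: B builds a hash-set index of all substrings of the joined adu text at the distinct token lengths, then scores each flattened evidence token by one O(1) set lookup, instead of A's nested loops that re-join adu_kp and run a substring scan (.find) for every token.
import Mathlib
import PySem

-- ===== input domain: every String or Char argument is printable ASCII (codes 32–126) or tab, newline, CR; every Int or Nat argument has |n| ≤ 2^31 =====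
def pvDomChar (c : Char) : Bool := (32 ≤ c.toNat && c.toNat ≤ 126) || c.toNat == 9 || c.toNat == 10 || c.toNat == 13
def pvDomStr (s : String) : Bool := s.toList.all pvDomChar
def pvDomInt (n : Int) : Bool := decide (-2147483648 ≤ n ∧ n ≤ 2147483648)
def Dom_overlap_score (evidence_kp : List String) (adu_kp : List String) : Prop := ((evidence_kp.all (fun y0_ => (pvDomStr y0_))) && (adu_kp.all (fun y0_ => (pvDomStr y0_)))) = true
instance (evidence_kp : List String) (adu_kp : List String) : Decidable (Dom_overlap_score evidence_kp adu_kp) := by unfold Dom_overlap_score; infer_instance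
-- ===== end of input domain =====

-- B replaces per-token substring scanning with a precomputed set of all substrings of the
-- joined text at the occurring token lengths, scoring each token by one set lookup (alternative algorithm).

-- ===== PORT A =====
-- literal port of A: nested loops, re-joining adu_kp and testing .find(j) != -1 for every token
def overlap_score (evidence_kp : List String) (adu_kp : List String) : Int :=
  evidence_kp.foldl (fun score i =>
    (PySem.Str.split₀ i).foldl (fun score j =>
      if PySem.Str.find (PySem.Str.join " " adu_kp) j ≠ -1 then score + 1 else score) score) 0

-- ===== PORT B =====
-- literal port of B: join once, flatten tokens, build the substring index `subs`
-- (all substrings of `joined` at each distinct token length), then count tokens found in it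
def overlap_score_alt (evidence_kp : List String) (adu_kp : List String) : Int :=
  let joined := PySem.Str.join " " adu_kp
  let tokens := evidence_kp.flatMap (fun phrase => PySem.Str.split₀ phrase)
  let lengths : PySem.Set Int := PySem.Set.ofList (tokens.map (fun t => PySem.Str.len t))
  let subs : PySem.Set String := lengths.foldl (fun s L =>
    (PySem.List.pyRange 0 (PySem.Str.len joined - L + 1) 1).foldl
      (fun s i => PySem.Set.add s (PySem.Str.slice joined (some i) (some (i + L)))) s)
    PySem.Set.empty
  ((tokens.countP (fun t => PySem.Set.contains subs t)) : Int)

-- ===== PRECONDITION & SPEC =====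
def Spec_overlap_score (evidence_kp : List String) (adu_kp : List String) (out : Int) : Prop := out = overlap_score_alt evidence_kp adu_kp
instance (evidence_kp : List String) (adu_kp : List String) (out : Int) : Decidable (Spec_overlap_score evidence_kp adu_kp out) := by unfold Spec_overlap_score; infer_instance

-- ===== CLAIM (what is proved, stated in full; the proofs are below) =====
def Claim_equal_overlap_score : Prop := ∀ (evidence_kp : List String) (adu_kp : List String), Dom_overlap_score evidence_kp adu_kp → Spec_overlap_score evidence_kp adu_kp (overlap_score evidence_kp adu_kp)

-- ===== LEMMAS AND PROOFS =====

-- counting fold over one list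
theorem count_fold (p : String → Bool) (l : List String) (init : Int) :
    l.foldl (fun s j => if p j then s + 1 else s) init = init + l.countP p := by
  induction l generalizing init with
  | nil => simp
  | cons x xs ih =>
    by_cases h : p x <;>
      simp only [List.foldl_cons, List.countP_cons, h, if_true, ih] <;>
      push_cast <;> ring

-- the nested fold of A counts over the flattened token list
theorem outer_fold (p : String → Bool) (ev : List String) (init : Int) :
    ev.foldl (fun score i => (PySem.Str.split₀ i).foldl
        (fun s j => if p j then s + 1 else s) score) init
      = init + (ev.flatMap (fun phrase => PySem.Str.split₀ phrase)).countP p := by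
  induction ev generalizing init with
  | nil => simp
  | cons x xs ih =>
    rw [List.foldl_cons, count_fold, ih, List.flatMap_cons, List.countP_append]
    push_cast; ring

-- .find(j) != -1 is exactly the substring test `j in joined`
theorem pred_eq (joined tok : String) :
    (PySem.Str.find joined tok ≠ -1) ↔ PySem.Str.isIn tok joined = true := by
  rw [Ne, PySem.Str.find_eq_neg_one_iff, PySem.Str.isIn_iff_infix]
  tauto

-- membership in the nested substring-building fold
theorem mem_subs_fold (joined : String) (Ls : List Int) (s0 : PySem.Set String) (y : String) :
    y ∈ Ls.foldl (fun s L =>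
        (PySem.List.pyRange 0 (PySem.Str.len joined - L + 1) 1).foldl
          (fun s i => PySem.Set.add s (PySem.Str.slice joined (some i) (some (i + L)))) s) s0
      ↔ y ∈ s0 ∨ ∃ L ∈ Ls, ∃ i ∈ PySem.List.pyRange 0 (PySem.Str.len joined - L + 1) 1,
          y = PySem.Str.slice joined (some i) (some (i + L)) := by
  induction Ls generalizing s0 with
  | nil => simp
  | cons L Ls ih =>
    rw [List.foldl_cons, ih, PySem.Set.mem_foldl_add]
    constructor
    · rintro (⟨h | ⟨i, hi, hy⟩⟩ | ⟨L', hL', h⟩)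
      · exact Or.inl h
      · exact Or.inr ⟨L, List.mem_cons_self, i, hi, hy⟩
      · exact Or.inr ⟨L', List.mem_cons_of_mem _ hL', h⟩
    · rintro (h | ⟨L', hL', i, hi, hy⟩)
      · exact Or.inl (Or.inl h)
      · rcases List.mem_cons.mp hL' with rfl | hL'
        · exact Or.inl (Or.inr ⟨i, hi, hy⟩)
        · exact Or.inr ⟨L', hL', i, hi, hy⟩

-- a take of a drop is an infix
theorem slice_infix (l : List Char) (n m : Nat) : List.take m (List.drop n l) <:+: l :=
  ((List.take_prefix m (List.drop n l)).isInfix).trans (List.drop_suffix n l).isInfix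

-- an infix occurs as a drop/take at some in-range offset
theorem infix_exists_offset {t l : List Char} (h : t <:+: l) :
    ∃ n : Nat, n + t.length ≤ l.length ∧ List.take t.length (List.drop n l) = t := by
  rcases h with ⟨pre, suf, rfl⟩
  refine ⟨pre.length, by simp, ?_⟩
  rw [List.append_assoc, List.drop_left, List.take_left' rfl]

-- for a string t whose length is in the index, membership in subs ↔ t infix of joined
theorem mem_subs_iff_infix (joined t : String) (Ls : List Int)
    (hmem : (PySem.Str.len t) ∈ Ls) (hnn : ∀ L ∈ Ls, 0 ≤ L) :
    t ∈ Ls.foldl (fun s L =>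
        (PySem.List.pyRange 0 (PySem.Str.len joined - L + 1) 1).foldl
          (fun s i => PySem.Set.add s (PySem.Str.slice joined (some i) (some (i + L)))) s)
        PySem.Set.empty
      ↔ t.toList <:+: joined.toList := by
  rw [mem_subs_fold]
  constructor
  · rintro (h | ⟨L, hL, i, hi, rfl⟩)
    · exact absurd h (by simp [PySem.Set.empty])
    · have h0L := hnn L hL
      have hi' := (PySem.List.mem_pyRange_one).mp hi
      have hsl : (PySem.Str.slice joined (some i) (some (i + L))).toList
          = List.take ((i + L).toNat - i.toNat) (List.drop i.toNat joined.toList) := by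
        simp only [PySem.Str.toList_slice, PySem.Chars.slice_eq_listSlice]
        exact PySem.List.slice_toNat _ hi'.1 (by omega)
      rw [hsl]; exact slice_infix _ _ _
  · intro h
    rcases infix_exists_offset h with ⟨n, hle, heq⟩
    right
    refine ⟨PySem.Str.len t, hmem, (n : Int), ?_, ?_⟩
    · rw [PySem.List.mem_pyRange_one]
      refine ⟨Int.natCast_nonneg n, ?_⟩
      simp only [PySem.Str.len_eq]
      omega
    · rw [← String.toList_inj]
      have hcast : ((n : Int) + PySem.Str.len t) = ((n : Int) + (t.toList.length : Int)) := by
        rw [PySem.Str.len_eq]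
      rw [hcast]
      simp only [PySem.Str.toList_slice, PySem.Chars.slice_eq_listSlice,
        PySem.List.slice_natCast_add]
      exact heq.symm

-- lengths in the index are nonnegative
theorem lengths_nonneg (tokens : List String) :
    ∀ L ∈ PySem.Set.ofList (tokens.map (fun t => PySem.Str.len t)), 0 ≤ L := by
  intro L hL
  rw [PySem.Set.mem_ofList] at hL
  rcases List.mem_map.mp hL with ⟨t, _, rfl⟩
  simp [PySem.Str.len_eq]

-- ===== VERDICT (by name: the statement is the Claim_ definition above) =====
theorem overlap_score_spec : Claim_equal_overlap_score := by
  intro ev adu _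
  unfold Spec_overlap_score overlap_score overlap_score_alt
  have hfun : (fun (s : Int) (j : String) =>
        if PySem.Str.find (PySem.Str.join " " adu) j ≠ -1 then s + 1 else s)
      = (fun (s : Int) (j : String) =>
        if PySem.Str.isIn j (PySem.Str.join " " adu) then s + 1 else s) := by
    funext s j; exact if_congr (pred_eq _ _) rfl rfl
  rw [hfun, outer_fold, zero_add]
  congr 1
  apply List.countP_congr
  intro t ht
  have hmem := mem_subs_iff_infix (PySem.Str.join " " adu) t
    (PySem.Set.ofList ((ev.flatMap (fun phrase => PySem.Str.split₀ phrase)).map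
      (fun t => PySem.Str.len t)))
    (by rw [PySem.Set.mem_ofList]; exact List.mem_map_of_mem ht)
    (lengths_nonneg _)
  rw [Bool.eq_iff_iff, PySem.Str.isIn_iff_infix, PySem.Set.contains_iff, hmem]
  simp
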